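-- pv_equiv track=rewrite | github.com/Zero2Infinity/Python | string_validators.py | string_validators
-- ===== SOURCE A (Python) =====
-- def string_validators(s):
--     'The any(0 method returns True if any element of an iteration is True'
--     result = [False] * 5
--     for i in range(0, len(s)):
--        if not result[1] and s[i].isalpha():
--             result[1] = True
--        if not result[2] and s[i].isdigit():
--             result[2] = True
--        if not result[3] and s[i].islower():
--             result[3] = True
--        if not result[4] and s[i].isupper():
--             result[4] = True
--
--     result[0] = result[1] or result[2]
--     return result
-- ===== SOURCE B (Python) =====
-- def string_validators(s):
--     alpha = any(c.isalpha() for c in s)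
--     digit = any(c.isdigit() for c in s)
--     lower = any(c.islower() for c in s)
--     upper = any(c.isupper() for c in s)
--     return [alpha or digit, alpha, digit, lower, upper]
-- ===== Notes on version B (the rewrite author's own statement) =====
-- stated objective: idiomatic
-- what changed: Replaces the single fused index loop that maintains a 5-slot flag list with four independent any() scans and a final list assembly.
import Mathlib
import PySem

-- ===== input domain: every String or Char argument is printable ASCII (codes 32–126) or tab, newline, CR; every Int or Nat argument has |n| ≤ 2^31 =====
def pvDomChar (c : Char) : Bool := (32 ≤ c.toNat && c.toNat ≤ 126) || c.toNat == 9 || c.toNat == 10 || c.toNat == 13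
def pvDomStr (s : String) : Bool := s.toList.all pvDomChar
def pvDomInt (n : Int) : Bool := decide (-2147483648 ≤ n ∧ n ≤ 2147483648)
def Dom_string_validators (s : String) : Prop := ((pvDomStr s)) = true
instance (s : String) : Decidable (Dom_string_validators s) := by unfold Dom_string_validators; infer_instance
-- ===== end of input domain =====

-- B replaces A's single fused flag-maintaining loop with four independent any-scans (idiomatic decomposition).

-- ===== PORT A =====
-- A's loop over indices, carrying result[1..4] as the fold state; result[0] set at the end.
def string_validators (s : String) : List Bool :=
  let r := s.toList.foldl
    (fun (r : Bool × Bool × Bool × Bool) c =>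
      let r1 := if !r.1 && PySem.Chars.isalpha c then true else r.1
      let r2 := if !r.2.1 && PySem.Chars.isdigit c then true else r.2.1
      let r3 := if !r.2.2.1 && PySem.Chars.islower c then true else r.2.2.1
      let r4 := if !r.2.2.2 && PySem.Chars.isupper c then true else r.2.2.2
      (r1, r2, r3, r4))
    (false, false, false, false)
  [r.1 || r.2.1, r.1, r.2.1, r.2.2.1, r.2.2.2]

-- ===== PORT B =====
def string_validators_alt (s : String) : List Bool :=
  let alpha := s.toList.any PySem.Chars.isalpha
  let digit := s.toList.any PySem.Chars.isdigit
  let lower := s.toList.any PySem.Chars.islower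
  let upper := s.toList.any PySem.Chars.isupper
  [alpha || digit, alpha, digit, lower, upper]

-- ===== PRECONDITION & SPEC =====
def Spec_string_validators (s : String) (out : List Bool) : Prop := out = string_validators_alt s
instance (s : String) (out : List Bool) : Decidable (Spec_string_validators s out) := by unfold Spec_string_validators; infer_instance

-- ===== CLAIM (what is proved, stated in full; the proofs are below) =====
def Claim_equal_string_validators : Prop := ∀ (s : String), Dom_string_validators s → Spec_string_validators s (string_validators s)

-- ===== LEMMAS AND PROOFS =====
theorem pv_fold_eq (l : List Char) (r1 r2 r3 r4 : Bool) :
    l.foldl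
      (fun (r : Bool × Bool × Bool × Bool) c =>
        let a := if !r.1 && PySem.Chars.isalpha c then true else r.1
        let b := if !r.2.1 && PySem.Chars.isdigit c then true else r.2.1
        let c3 := if !r.2.2.1 && PySem.Chars.islower c then true else r.2.2.1
        let d := if !r.2.2.2 && PySem.Chars.isupper c then true else r.2.2.2
        (a, b, c3, d))
      (r1, r2, r3, r4)
    = (r1 || l.any PySem.Chars.isalpha, r2 || l.any PySem.Chars.isdigit,
       r3 || l.any PySem.Chars.islower, r4 || l.any PySem.Chars.isupper) := by
  induction l generalizing r1 r2 r3 r4 with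
  | nil => simp
  | cons c t ih =>
    simp only [List.foldl_cons, List.any_cons, ih]
    congr 1
    · cases r1 <;> cases h : PySem.Chars.isalpha c <;> simp
    congr 1
    · cases r2 <;> cases h : PySem.Chars.isdigit c <;> simp
    congr 1
    · cases r3 <;> cases h : PySem.Chars.islower c <;> simp
    · cases r4 <;> cases h : PySem.Chars.isupper c <;> simp

-- ===== VERDICT (by name: the statement is the Claim_ definition above) =====
theorem string_validators_spec : Claim_equal_string_validators := by
  intro s _
  unfold Spec_string_validators string_validators string_validators_alt
  simp only [pv_fold_eq]
  simp
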